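-- pv_equiv track=rewrite | github.com/AlexMorson/gsa-ultra-2019 | its-a-kind-of-magic/code.py | _occurrences
-- ===== SOURCE A (Python) =====
-- def _occurrences(s, L, R):
--     if s == "":
--         return 0, False, False
--
--     s_int = int(s) # Be aware that s may contain leading 0s
--
--     p = 10**len(s)
--
--     if p // 10 > R:
--         return 0, False, False
--
--     R_beg = R // p
--     R_end = R % p
--
--     # No leading 0s in string representation of j
--     upped = False
--     if L < p // 10:
--         upped = True
--         L = p // 10
--
--     L_beg = L // p
--     L_end = L % p
--
--     count = R_beg - L_beg
--
--     if L_end > s_int: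
--         count -= 1
--     if R_end >= s_int:
--         count += 1
--
--     next_count, start_s, end_s = _occurrences(s, L // 10, R // 10)
--     next_count *= 10
--     if start_s:
--         next_count -= L_end % 10
--     if end_s:
--         next_count -= 9 - R_end % 10
--
--     return count + next_count, (L_end == s_int and not upped) or start_s, R_end == s_int or end_s
-- ===== SOURCE B (Python) =====
-- def _occurrences(s, L, R):
--     # Two-phase rewrite: phase 1 builds per-digit-length frames iteratively;
--     # phase 2 folds them deepest-first, exactly reversing the recursion.
--     if s == "":
--         return 0, False, False
--     s_int = int(s)
--     p = 10 ** len(s)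
--     frames = []
--     while p // 10 <= R:
--         R_end = R % p
--         upped = L < p // 10
--         if upped:
--             L = p // 10
--         L_end = L % p
--         count = R // p - L // p
--         if L_end > s_int:
--             count -= 1
--         if R_end >= s_int:
--             count += 1
--         frames.append((count, L_end, R_end, upped))
--         L //= 10
--         R //= 10
--     total, start_s, end_s = 0, False, False
--     for count, L_end, R_end, upped in reversed(frames):
--         total *= 10
--         if start_s:
--             total -= L_end % 10
--         if end_s:
--             total -= 9 - R_end % 10
--         total += count
--         start_s = (L_end == s_int and not upped) or start_s
--         end_s = (R_end == s_int) or end_s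
--     return total, start_s, end_s
-- ===== Notes on version B (the rewrite author's own statement) =====
-- stated objective: alternative
-- what changed: Replaced the self-recursion with an explicit two-phase iteration: a while-loop that records one frame (count, L_end, R_end, upped) per digit level, then a single fold over the reversed frame list that combines counts and flags exactly as the recursion's return path did.
import Mathlib
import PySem

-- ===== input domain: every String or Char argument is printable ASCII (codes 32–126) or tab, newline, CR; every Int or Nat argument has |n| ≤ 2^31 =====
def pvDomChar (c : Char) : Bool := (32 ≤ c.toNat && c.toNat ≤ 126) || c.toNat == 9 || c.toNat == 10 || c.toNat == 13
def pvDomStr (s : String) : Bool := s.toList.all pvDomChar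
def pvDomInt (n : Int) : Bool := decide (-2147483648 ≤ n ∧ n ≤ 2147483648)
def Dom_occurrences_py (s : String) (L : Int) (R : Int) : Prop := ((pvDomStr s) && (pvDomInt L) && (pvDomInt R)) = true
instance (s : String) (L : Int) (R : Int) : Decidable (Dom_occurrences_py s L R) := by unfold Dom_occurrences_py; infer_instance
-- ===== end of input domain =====

-- B replaces A's recursion by an explicit two-phase loop (build the per-level frames, then fold them
-- deepest-first); objective: alternative decomposition, same asymptotic cost.

-- termination helper for both ports (cited by name in decreasing_by)
theorem pv_len_pos (s : String) (h : ¬ s = "") : 1 ≤ s.toList.length :=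
  List.length_pos_iff.mpr (fun hn => h (String.toList_eq_nil_iff.mp hn))

theorem pv_fdiv_pow10 (n : Nat) (hn : 1 ≤ n) :
    PySem.Int.floordiv ((10 : Int) ^ n) 10 = (10 : Int) ^ (n - 1) := by
  rw [PySem.Int.floordiv_eq_ediv_of_pos (by norm_num)]
  obtain ⟨m, rfl⟩ := Nat.exists_eq_add_of_le hn
  rw [add_comm, pow_succ]
  simp

theorem pv_fdiv10_toNat_lt (R : Int) (hR : 1 ≤ R) :
    (PySem.Int.floordiv R 10).toNat < R.toNat := by
  rw [PySem.Int.floordiv_eq_ediv_of_pos (by norm_num)]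
  omega

-- ===== PORT A =====
def occurrences_py (s : String) (L : Int) (R : Int) : Int × Bool × Bool :=
  if hs : s = "" then (0, false, false)
  else
    let s_int : Int := (PySem.Int.ofStr? s).getD 0
    let p : Int := 10 ^ s.toList.length
    if hstop : PySem.Int.floordiv p 10 > R then (0, false, false)
    else
      let R_beg := PySem.Int.floordiv R p
      let R_end := PySem.Int.mod R p
      let upped : Bool := decide (L < PySem.Int.floordiv p 10)
      let L' : Int := if L < PySem.Int.floordiv p 10 then PySem.Int.floordiv p 10 else L
      let L_beg := PySem.Int.floordiv L' p
      let L_end := PySem.Int.mod L' p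
      let count0 := R_beg - L_beg
      let count1 := if L_end > s_int then count0 - 1 else count0
      let count := if R_end ≥ s_int then count1 + 1 else count1
      let r := occurrences_py s (PySem.Int.floordiv L' 10) (PySem.Int.floordiv R 10)
      let next0 := r.1 * 10
      let next1 := if r.2.1 then next0 - PySem.Int.mod L_end 10 else next0
      let next_count := if r.2.2 then next1 - (9 - PySem.Int.mod R_end 10) else next1
      (count + next_count, (decide (L_end = s_int) && !upped) || r.2.1,
       decide (R_end = s_int) || r.2.2)
termination_by R.toNat
decreasing_by
  apply pv_fdiv10_toNat_lt
  have h1 := pv_fdiv_pow10 s.toList.length (pv_len_pos s hs)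
  have h2 : (1 : Int) ≤ (10 : Int) ^ (s.toList.length - 1) := one_le_pow₀ (by norm_num)
  simp only [p] at hstop
  omega

-- ===== PORT B =====
-- phase 1 of Source B: the while-loop collecting one frame (count, L_end, R_end, upped) per level;
-- p = 10^(n+1) where n+1 = len(s) (n is passed so the loop's termination is manifest)
def pvFrames (s_int : Int) (n : Nat) (L : Int) (R : Int) : List (Int × Int × Int × Bool) :=
  let p : Int := 10 ^ (n + 1)
  if hgo : PySem.Int.floordiv p 10 ≤ R then
    let R_end := PySem.Int.mod R p
    let upped : Bool := decide (L < PySem.Int.floordiv p 10)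
    let L' : Int := if L < PySem.Int.floordiv p 10 then PySem.Int.floordiv p 10 else L
    let L_end := PySem.Int.mod L' p
    let count0 := PySem.Int.floordiv R p - PySem.Int.floordiv L' p
    let count1 := if L_end > s_int then count0 - 1 else count0
    let count := if R_end ≥ s_int then count1 + 1 else count1
    (count, L_end, R_end, upped) :: pvFrames s_int n (PySem.Int.floordiv L' 10) (PySem.Int.floordiv R 10)
  else []
termination_by R.toNat
decreasing_by
  apply pv_fdiv10_toNat_lt
  have h1 := pv_fdiv_pow10 (n + 1) (by omega)
  have h2 : (1 : Int) ≤ (10 : Int) ^ (n + 1 - 1) := one_le_pow₀ (by norm_num)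
  simp only [p] at hgo
  omega

-- phase 2 of Source B: the body of the `for … in reversed(frames)` loop
def pvStep (s_int : Int) (acc : Int × Bool × Bool) (f : Int × Int × Int × Bool) : Int × Bool × Bool :=
  let t1 := acc.1 * 10
  let t2 := if acc.2.1 then t1 - PySem.Int.mod f.2.1 10 else t1
  let t3 := if acc.2.2 then t2 - (9 - PySem.Int.mod f.2.2.1 10) else t2
  (t3 + f.1, (decide (f.2.1 = s_int) && !f.2.2.2) || acc.2.1,
   decide (f.2.2.1 = s_int) || acc.2.2)

def occurrences_py_alt (s : String) (L : Int) (R : Int) : Int × Bool × Bool :=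
  if s = "" then (0, false, false)
  else
    let s_int : Int := (PySem.Int.ofStr? s).getD 0
    let frames := pvFrames s_int (s.toList.length - 1) L R
    frames.reverse.foldl (pvStep s_int) (0, false, false)

-- ===== PRECONDITION & SPEC =====
-- Pre_ excludes the inputs where int(s) raises ValueError (s nonempty but not an int literal).
def Pre_occurrences_py (s : String) (L : Int) (R : Int) : Prop :=
  s = "" ∨ (PySem.Int.ofStr? s).isSome = true
instance (s : String) (L : Int) (R : Int) : Decidable (Pre_occurrences_py s L R) := by unfold Pre_occurrences_py; infer_instance

def pvWitness_occurrences_py : String × Int × Int := ("07", 3, 5000)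

def Spec_occurrences_py (s : String) (L : Int) (R : Int) (out : Int × Bool × Bool) : Prop := out = occurrences_py_alt s L R
instance (s : String) (L : Int) (R : Int) (out : Int × Bool × Bool) : Decidable (Spec_occurrences_py s L R out) := by unfold Spec_occurrences_py; infer_instance

-- ===== CLAIM (what is proved, stated in full; the proofs are below) =====
def Claim_equal_occurrences_py : Prop := ∀ (s : String) (L : Int) (R : Int), Dom_occurrences_py s L R → Pre_occurrences_py s L R → Spec_occurrences_py s L R (occurrences_py s L R)

-- ===== LEMMAS AND PROOFS =====

theorem pv_stop_case (s : String) (hs : ¬ s = "")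
    (L R : Int) (hstop : PySem.Int.floordiv ((10 : Int) ^ s.toList.length) 10 > R) :
    occurrences_py s L R =
      ((pvFrames ((PySem.Int.ofStr? s).getD 0) (s.toList.length - 1) L R).reverse.foldl
        (pvStep ((PySem.Int.ofStr? s).getD 0)) (0, false, false)) := by
  have hlen : s.toList.length - 1 + 1 = s.toList.length := by
    have := pv_len_pos s hs; omega
  rw [occurrences_py.eq_def, pvFrames.eq_def, hlen]
  simp only [dif_neg hs, dif_pos hstop, dif_neg (by omega : ¬ PySem.Int.floordiv ((10 : Int) ^ s.toList.length) 10 ≤ R)]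
  simp

theorem pv_key (s : String) (hs : ¬ s = "") :
    ∀ (m : Nat) (L R : Int), R.toNat ≤ m →
      occurrences_py s L R =
        ((pvFrames ((PySem.Int.ofStr? s).getD 0) (s.toList.length - 1) L R).reverse.foldl
          (pvStep ((PySem.Int.ofStr? s).getD 0)) (0, false, false)) := by
  intro m
  have hlen : s.toList.length - 1 + 1 = s.toList.length := by
    have := pv_len_pos s hs; omega
  have h1 := pv_fdiv_pow10 s.toList.length (pv_len_pos s hs)
  have h2 : (1 : Int) ≤ (10 : Int) ^ (s.toList.length - 1) := one_le_pow₀ (by norm_num)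
  induction m with
  | zero =>
    intro L R hR
    exact pv_stop_case s hs L R (by omega)
  | succ k ih =>
    intro L R hR
    by_cases hstop : PySem.Int.floordiv ((10 : Int) ^ s.toList.length) 10 > R
    · exact pv_stop_case s hs L R hstop
    · rw [occurrences_py.eq_def, pvFrames.eq_def, hlen]
      simp only [dif_neg hs, dif_neg hstop, dif_pos (by omega : PySem.Int.floordiv ((10 : Int) ^ s.toList.length) 10 ≤ R)]
      rw [List.reverse_cons, List.foldl_append, List.foldl_cons, List.foldl_nil]
      have hrec : (PySem.Int.floordiv R 10).toNat ≤ k := by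
        have := pv_fdiv10_toNat_lt R (by omega)
        omega
      rw [← ih _ _ hrec]
      simp only [pvStep]
      exact Prod.ext (Int.add_comm _ _) rfl

-- ===== VERDICT (by name: the statement is the Claim_ definition above) =====
theorem occurrences_py_spec : Claim_equal_occurrences_py := by
  intro s L R _ _
  unfold Spec_occurrences_py occurrences_py_alt
  by_cases hs : s = ""
  · subst hs
    rw [occurrences_py]
    simp
  · rw [if_neg hs]
    exact pv_key s hs R.toNat L R le_rfl
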